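-- pv_equiv track=rewrite | github.com/GEMScienceTools/oq-mbtk | openquake/wkf/seismicity/nodal_plane.py | get_simplified_classification
-- ===== SOURCE A (Python) =====
-- def get_simplified_classification(histo, keys):
--     simpl_class = {'N': 0, 'SS': 0, 'R': 0}
--     for num, key in zip(histo, keys):
--         if key == 'SS-N' or key == 'SS-R':
--             simpl_class['SS'] += num
--         elif key == 'N-SS':
--             simpl_class['N'] += num
--         elif key == 'R-SS':
--             simpl_class['R'] += num
--         else:
--             simpl_class[key] += num
--     return simpl_class
-- ===== SOURCE B (Python) =====
-- def get_simplified_classification(histo, keys):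
--     remap = {'SS-N': 'SS', 'SS-R': 'SS', 'N-SS': 'N', 'R-SS': 'R'}
--     mapped = [remap.get(k, k) for k in keys]
--     return {c: sum(n for n, m in zip(histo, mapped) if m == c)
--             for c in ('N', 'SS', 'R')}
-- ===== Notes on version B (the rewrite author's own statement) =====
-- stated objective: simpler
-- what changed: Replaces A's if/elif branch cascade mutating a dict inside one loop by a remap lookup table applied to the keys plus an independent per-bucket sum comprehension for each of the three classes.
import Mathlib
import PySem

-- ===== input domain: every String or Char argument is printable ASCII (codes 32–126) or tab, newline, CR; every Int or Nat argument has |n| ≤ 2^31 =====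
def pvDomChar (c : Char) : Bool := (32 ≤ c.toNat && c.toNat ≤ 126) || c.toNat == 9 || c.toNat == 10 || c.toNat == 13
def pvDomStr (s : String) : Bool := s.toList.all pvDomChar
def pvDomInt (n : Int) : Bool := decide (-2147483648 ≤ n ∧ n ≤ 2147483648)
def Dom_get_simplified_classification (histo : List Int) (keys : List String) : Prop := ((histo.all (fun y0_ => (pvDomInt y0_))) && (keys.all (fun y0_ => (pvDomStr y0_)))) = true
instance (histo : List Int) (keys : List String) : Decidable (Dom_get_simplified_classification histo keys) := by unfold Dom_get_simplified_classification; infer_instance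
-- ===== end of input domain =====

-- B replaces A's if/elif branch cascade over a mutating dict by a remap table plus three
-- independent bucket sums (objective: simpler). Where A raises KeyError on an unrecognized
-- key, B returns the zero-initialized bucket sums (those inputs are outside Pre_).

-- ===== PORT A =====
-- loop body of A: the if/elif cascade updating the dict (simpl_class[...] += num);
-- on Pre_ every touched key is present, so Dict.modify is exact (KeyError is excluded by Pre_)
def pvStepA (simpl_class : PySem.Dict String Int) (p : Int × String) : PySem.Dict String Int :=
  if p.2 = "SS-N" ∨ p.2 = "SS-R" then simpl_class.modify "SS" 0 (· + p.1)
  else if p.2 = "N-SS" then simpl_class.modify "N" 0 (· + p.1)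
  else if p.2 = "R-SS" then simpl_class.modify "R" 0 (· + p.1)
  else simpl_class.modify p.2 0 (· + p.1)

def get_simplified_classification (histo : List Int) (keys : List String) : List (String × Int) :=
  ((histo.zip keys).foldl pvStepA (PySem.Dict.ofList [("N", 0), ("SS", 0), ("R", 0)])).items

-- ===== PORT B =====
-- remap.get(k, k) for remap = {'SS-N':'SS','SS-R':'SS','N-SS':'N','R-SS':'R'}
def pvRemapGet (k : String) : String :=
  (PySem.Dict.ofList [("SS-N","SS"),("SS-R","SS"),("N-SS","N"),("R-SS","R")]).getD k k

def get_simplified_classification_alt (histo : List Int) (keys : List String) : List (String × Int) :=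
  ["N", "SS", "R"].map (fun c =>
    (c, (((histo.zip (keys.map pvRemapGet)).filter (fun p => p.2 == c)).map (·.1)).sum))

-- ===== PRECONDITION & SPEC =====
-- Pre_ excludes inputs where some key paired with a histogram entry is none of the seven
-- classification labels: there Python A raises KeyError (returns no value).
def Pre_get_simplified_classification (histo : List Int) (keys : List String) : Prop :=
  ∀ p ∈ histo.zip keys,
    p.2 ∈ (["N", "SS", "R", "SS-N", "SS-R", "N-SS", "R-SS"] : List String)
instance (histo : List Int) (keys : List String) : Decidable (Pre_get_simplified_classification histo keys) := by unfold Pre_get_simplified_classification; infer_instance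

def pvWitness_get_simplified_classification : List Int × List String :=
  ([3, 1, 2, 5], ["SS-N", "N", "R", "SS"])

def Spec_get_simplified_classification (histo : List Int) (keys : List String) (out : List (String × Int)) : Prop := out = get_simplified_classification_alt histo keys
instance (histo : List Int) (keys : List String) (out : List (String × Int)) : Decidable (Spec_get_simplified_classification histo keys out) := by unfold Spec_get_simplified_classification; infer_instance

-- ===== CLAIM (what is proved, stated in full; the proofs are below) =====
def Claim_equal_get_simplified_classification : Prop := ∀ (histo : List Int) (keys : List String), Dom_get_simplified_classification histo keys → Pre_get_simplified_classification histo keys → Spec_get_simplified_classification histo keys (get_simplified_classification histo keys)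


-- ===== LEMMAS AND PROOFS =====

-- B's per-bucket sum, expressed over the original zipped pairs
def pvBSum (c : String) (l : List (Int × String)) : Int :=
  (((l.map (Prod.map id pvRemapGet)).filter (fun p => p.2 == c)).map (·.1)).sum

theorem pvBSum_cons (c : String) (n : Int) (k : String) (l : List (Int × String)) :
    pvBSum c ((n, k) :: l) = (if pvRemapGet k == c then n else 0) + pvBSum c l := by
  by_cases h : pvRemapGet k == c <;> simp [pvBSum, h]

theorem pvStepA_eq (a b c n : Int) (k : String)
    (hk : k ∈ (["N", "SS", "R", "SS-N", "SS-R", "N-SS", "R-SS"] : List String)) :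
    pvStepA (PySem.Dict.mk [("N", a), ("SS", b), ("R", c)]) (n, k) =
    PySem.Dict.mk [("N", a + if pvRemapGet k == "N" then n else 0),
                   ("SS", b + if pvRemapGet k == "SS" then n else 0),
                   ("R", c + if pvRemapGet k == "R" then n else 0)] := by
  simp only [List.mem_cons, List.not_mem_nil, or_false] at hk
  rcases hk with hk | hk | hk | hk | hk | hk | hk <;> subst hk <;>
    simp [pvStepA, pvRemapGet, PySem.Dict.modify, PySem.Dict.contains, PySem.Dict.getD,
      PySem.Dict.get?, PySem.Dict.insert, PySem.Dict.ofList, PySem.Dict.update,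
      PySem.Dict.empty]

theorem pvLoopA (l : List (Int × String)) (a b c : Int)
    (h : ∀ p ∈ l, p.2 ∈ (["N", "SS", "R", "SS-N", "SS-R", "N-SS", "R-SS"] : List String)) :
    l.foldl pvStepA (PySem.Dict.mk [("N", a), ("SS", b), ("R", c)]) =
    PySem.Dict.mk [("N", a + pvBSum "N" l), ("SS", b + pvBSum "SS" l), ("R", c + pvBSum "R" l)] := by
  induction l generalizing a b c with
  | nil => simp [pvBSum]
  | cons p l ih =>
    obtain ⟨n, k⟩ := p
    have hk := h (n, k) (List.mem_cons_self)
    have hl : ∀ p ∈ l, p.2 ∈ (["N", "SS", "R", "SS-N", "SS-R", "N-SS", "R-SS"] : List String) :=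
      fun p hp => h p (List.mem_cons_of_mem _ hp)
    rw [List.foldl_cons, pvStepA_eq a b c n k hk, ih _ _ _ hl]
    simp [pvBSum_cons, add_assoc]

-- ===== VERDICT (by name: the statement is the Claim_ definition above) =====
theorem get_simplified_classification_spec : Claim_equal_get_simplified_classification := by
  intro histo keys _ hpre
  unfold Spec_get_simplified_classification
  unfold get_simplified_classification get_simplified_classification_alt
  rw [List.zip_map_right]
  rw [show PySem.Dict.ofList [("N", (0:Int)), ("SS", 0), ("R", 0)]
        = PySem.Dict.mk [("N", 0), ("SS", 0), ("R", 0)] from rfl]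
  rw [pvLoopA _ _ _ _ hpre]
  simp [pvBSum]
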